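-- pv_equiv track=rewrite | github.com/sain-data-academy-jan-2021/Garys_Mini_Project | vc/app013.py | summerise_list
-- ===== SOURCE A (Python) =====
-- def summerise_list(lst: list) -> list[str]:
--     res = []
--     for i in range(len(lst)):
--         count = 0
--         for j in range(len(lst)):
--             if lst[i] == lst[j]:
--                 count += 1
--         res.append(f"{count}x {lst[i]}")
--
--     res = list(set(res))
--     res.sort()
--     return res
-- ===== SOURCE B (Python) =====
-- def summerise_list(lst: list) -> list[str]:
--     distinct = []
--     for x in lst:
--         if x not in distinct:
--             distinct.append(x)
--     res = [f"{sum(1 for y in lst if y == x)}x {x}" for x in distinct]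
--     res.sort()
--     return res
-- ===== Notes on version B (the rewrite author's own statement) =====
-- stated objective: faster
-- what changed: B first deduplicates the values (one linear-membership pass), then counts and formats each distinct value once and sorts, instead of A's count-and-format per element double loop followed by a set dedup of n strings.
import Mathlib
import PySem

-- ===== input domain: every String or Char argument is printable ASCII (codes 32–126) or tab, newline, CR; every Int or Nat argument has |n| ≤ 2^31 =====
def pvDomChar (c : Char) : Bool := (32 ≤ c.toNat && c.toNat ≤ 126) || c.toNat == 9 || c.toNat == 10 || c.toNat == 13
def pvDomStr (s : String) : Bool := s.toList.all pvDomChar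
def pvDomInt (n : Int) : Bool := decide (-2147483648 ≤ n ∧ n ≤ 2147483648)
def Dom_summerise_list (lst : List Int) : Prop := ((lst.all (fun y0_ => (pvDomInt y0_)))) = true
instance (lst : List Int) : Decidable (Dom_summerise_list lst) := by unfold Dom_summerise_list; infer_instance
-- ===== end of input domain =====

-- B deduplicates the values first, then counts and formats each distinct value once and sorts,
-- instead of A's emit-one-string-per-element double loop followed by a set dedup of the strings.

-- ===== PORT A =====
def summerise_list (lst : List Int) : List String :=
  PySem.List.sorted
    (PySem.Set.ofList
      ((PySem.List.pyRange 0 (PySem.List.len lst) 1).foldl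
        (fun res i =>
          res ++ [PySem.Str.join ""
            [PySem.Int.toStr
              ((PySem.List.pyRange 0 (PySem.List.len lst) 1).foldl
                (fun count j => if PySem.List.pyGetD lst i 0 == PySem.List.pyGetD lst j 0 then count + 1 else count) 0),
             "x ", PySem.Int.toStr (PySem.List.pyGetD lst i 0)]]) []))
    (fun x => x) false

-- ===== PORT B =====
def summerise_list_alt (lst : List Int) : List String :=
  PySem.List.sorted
    ((lst.foldl (fun d x => if x ∈ d then d else d ++ [x]) []).map (fun x =>
      PySem.Str.join "" [PySem.Int.toStr (lst.foldl (fun c y => if y == x then c + 1 else c) 0),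
        "x ", PySem.Int.toStr x]))
    (fun x => x) false

-- ===== PRECONDITION & SPEC =====
def Spec_summerise_list (lst : List Int) (out : List String) : Prop := out = summerise_list_alt lst
instance (lst : List Int) (out : List String) : Decidable (Spec_summerise_list lst out) := by unfold Spec_summerise_list; infer_instance

-- ===== CLAIM (what is proved, stated in full; the proofs are below) =====
def Claim_equal_summerise_list : Prop := ∀ (lst : List Int), Dom_summerise_list lst → Spec_summerise_list lst (summerise_list lst)

-- ===== LEMMAS AND PROOFS =====

-- the formatted string of one distinct value (common normal form of both ports)
def pvFmt (lst : List Int) (v : Int) : String :=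
  PySem.Str.join "" [PySem.Int.toStr ((lst.count v : Int)), "x ", PySem.Int.toStr v]

theorem pv_digitChar_inj : ∀ (a b : Fin 10), Nat.digitChar a = Nat.digitChar b → a = b := by decide

theorem pv_toDigits_inj (m : ℕ) : ∀ n : ℕ, Nat.toDigits 10 m = Nat.toDigits 10 n → m = n := by
  induction m using Nat.strong_induction_on with
  | _ m ih =>
    intro n h
    have hme := Nat.toDigits_eq_if (b := 10) (n := m) (by norm_num)
    have hne := Nat.toDigits_eq_if (b := 10) (n := n) (by norm_num)
    rw [hme, hne] at h
    by_cases hm : m < 10 <;> by_cases hn : n < 10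
    · rw [if_pos hm, if_pos hn] at h
      have := pv_digitChar_inj ⟨m, hm⟩ ⟨n, hn⟩ (by simpa using h)
      simpa using congrArg Fin.val this
    · rw [if_pos hm, if_neg hn] at h
      have hl := congrArg List.length h
      have hp := Nat.length_toDigits_pos (b := 10) (n := n / 10)
      simp only [List.length_append, List.length_cons, List.length_nil] at hl
      omega
    · rw [if_neg hm, if_pos hn] at h
      have hl := congrArg List.length h
      have hp := Nat.length_toDigits_pos (b := 10) (n := m / 10)
      simp only [List.length_append, List.length_cons, List.length_nil] at hl
      omega
    · rw [if_neg hm, if_neg hn] at h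
      obtain ⟨hpre, hlast⟩ := List.append_inj' h (by simp)
      have hdiv : m / 10 = n / 10 := ih (m / 10) (by omega) (n / 10) hpre
      have hmod : m % 10 = n % 10 := by
        have := pv_digitChar_inj ⟨m % 10, by omega⟩ ⟨n % 10, by omega⟩ (by simpa using hlast)
        simpa using congrArg Fin.val this
      omega

theorem pv_not_digit_not_mem (n : ℕ) {c : Char} (hc : c.isDigit = false) : c ∉ Nat.toDigits 10 n := by
  intro hmem
  have := Nat.isDigit_of_mem_toDigits (by norm_num) (by norm_num) hmem
  rw [hc] at this
  exact Bool.false_ne_true this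

theorem pv_toChars_inj (m n : Int) (h : PySem.Int.toChars m = PySem.Int.toChars n) : m = n := by
  unfold PySem.Int.toChars at h
  by_cases hm : m < 0 <;> by_cases hn : n < 0
  · rw [if_pos hm, if_pos hn] at h
    have := pv_toDigits_inj m.natAbs n.natAbs (by simpa using h)
    omega
  · rw [if_pos hm, if_neg hn] at h
    exact absurd (h ▸ List.mem_cons_self) (pv_not_digit_not_mem n.toNat (by decide))
  · rw [if_neg hm, if_pos hn] at h
    exact absurd (h ▸ List.mem_cons_self) (pv_not_digit_not_mem m.toNat (by decide))
  · rw [if_neg hm, if_neg hn] at h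
    have := pv_toDigits_inj m.toNat n.toNat h
    omega

theorem pv_x_not_mem_toChars (n : Int) : 'x' ∉ PySem.Int.toChars n := by
  unfold PySem.Int.toChars
  by_cases hn : n < 0
  · rw [if_pos hn]
    intro hmem
    rcases List.mem_cons.mp hmem with h | h
    · exact absurd h (by decide)
    · exact pv_not_digit_not_mem n.natAbs (by decide) h
  · rw [if_neg hn]
    exact pv_not_digit_not_mem n.toNat (by decide)

theorem pv_split_x : ∀ (a1 a2 t1 t2 : List Char), 'x' ∉ a1 → 'x' ∉ a2 →
    a1 ++ 'x' :: t1 = a2 ++ 'x' :: t2 → a1 = a2 ∧ t1 = t2 := by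
  intro a1
  induction a1 with
  | nil =>
    intro a2 t1 t2 _ h2 h
    cases a2 with
    | nil => simpa using h
    | cons c cs =>
      simp only [List.nil_append, List.cons_append, List.cons.injEq] at h
      exact absurd (h.1 ▸ List.mem_cons_self) h2
  | cons c cs ih =>
    intro a2 t1 t2 h1 h2 h
    cases a2 with
    | nil =>
      simp only [List.cons_append, List.nil_append, List.cons.injEq] at h
      exact absurd (h.1 ▸ List.mem_cons_self) h1
    | cons d ds =>
      simp only [List.cons_append, List.cons.injEq] at h
      obtain ⟨hcd, hrest⟩ := h
      have := ih ds t1 t2 (fun hx => h1 (List.mem_cons_of_mem _ hx)) (fun hx => h2 (List.mem_cons_of_mem _ hx)) hrest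
      exact ⟨by rw [hcd, this.1], this.2⟩

theorem pv_join_toList (a b : Int) :
    (PySem.Str.join "" [PySem.Int.toStr a, "x ", PySem.Int.toStr b]).toList
      = PySem.Int.toChars a ++ 'x' :: ' ' :: PySem.Int.toChars b := by
  simp [PySem.Str.join, PySem.Chars.join, List.intercalate, PySem.Int.toList_toStr, List.intersperse]

theorem pvFmt_inj (lst : List Int) {v1 v2 : Int} (h : pvFmt lst v1 = pvFmt lst v2) : v1 = v2 := by
  have h' := congrArg String.toList h
  simp only [pvFmt, pv_join_toList] at h'
  have := pv_split_x _ _ _ _ (pv_x_not_mem_toChars _) (pv_x_not_mem_toChars _) h'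
  have htail := this.2
  simp only [List.cons.injEq] at htail
  exact pv_toChars_inj v1 v2 htail.2

theorem pv_count_fold (lst : List Int) (v : Int) :
    lst.foldl (fun c y => if v == y then c + 1 else c) 0 = (lst.count v : Int) := by
  have h : (fun (c : Int) y => if v == y then c + 1 else c) = (fun c y => if y == v then c + 1 else c) := by
    funext c y; rcases eq_or_ne v y with h | h
    · simp [h]
    · simp [h, h.symm]
  rw [h, PySem.List.foldl_beq_add_one]
  simp

theorem pv_foldl_add (lst : List Int) :
    lst.foldl (fun d x => if x ∈ d then d else d ++ [x]) [] = PySem.Set.ofList lst := by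
  induction lst using List.reverseRecOn with
  | nil => rfl
  | append_singleton xs x ih =>
    rw [List.foldl_append, List.foldl_cons, List.foldl_nil, ih,
      PySem.Set.ofList_append_singleton, PySem.Set.add_eq_ite]

theorem pv_ofList_map_inj (f : Int → String) (hf : ∀ a b, f a = f b → a = b) (lst : List Int) :
    PySem.Set.ofList (lst.map f) = (PySem.Set.ofList lst).map f := by
  induction lst using List.reverseRecOn with
  | nil => rfl
  | append_singleton xs x ih =>
    rw [List.map_append, List.map_singleton, PySem.Set.ofList_append_singleton,
      PySem.Set.ofList_append_singleton, ih, PySem.Set.add_eq_ite, PySem.Set.add_eq_ite]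
    by_cases hx : x ∈ PySem.Set.ofList xs
    · rw [if_pos hx, if_pos]
      exact List.mem_map_of_mem hx
    · rw [if_neg hx, if_neg, List.map_append, List.map_singleton]
      intro hmem
      rcases List.mem_map.mp hmem with ⟨y, hy, hxy⟩
      exact hx (hf y x hxy ▸ hy)

theorem pvA_eq (lst : List Int) :
    summerise_list lst = PySem.List.sorted (PySem.Set.ofList (lst.map (pvFmt lst))) (fun x => x) false := by
  unfold summerise_list
  have hin : ∀ v : Int, (PySem.List.pyRange 0 (PySem.List.len lst) 1).foldl
      (fun count j => if v == PySem.List.pyGetD lst j 0 then count + 1 else count) 0 = (lst.count v : Int) := by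
    intro v
    rw [PySem.List.foldl_pyRange_zero_pyGetD lst 0 (fun c y => if v == y then c + 1 else c) 0]
    exact pv_count_fold lst v
  rw [PySem.List.foldl_pyRange_zero_pyGetD lst 0
    (fun res v => res ++ [PySem.Str.join "" [PySem.Int.toStr
      ((PySem.List.pyRange 0 (PySem.List.len lst) 1).foldl
        (fun count j => if v == PySem.List.pyGetD lst j 0 then count + 1 else count) 0),
      "x ", PySem.Int.toStr v]]) []]
  simp only [hin]
  rw [PySem.List.foldl_append_singleton_eq_map]
  rfl

theorem pvB_eq (lst : List Int) :
    summerise_list_alt lst = PySem.List.sorted ((PySem.Set.ofList lst).map (pvFmt lst)) (fun x => x) false := by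
  unfold summerise_list_alt
  rw [pv_foldl_add]
  congr 1
  apply List.map_congr_left
  intro x _
  rw [PySem.List.foldl_beq_add_one]
  simp [pvFmt]

-- ===== VERDICT (by name: the statement is the Claim_ definition above) =====
theorem summerise_list_spec : Claim_equal_summerise_list := by
  intro lst _
  unfold Spec_summerise_list
  rw [pvA_eq, pvB_eq, pv_ofList_map_inj (pvFmt lst) (fun a b => pvFmt_inj lst)]
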